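-- pv_equiv track=rewrite | github.com/chesaman12/cscd110 | Wordplay.py | is_scrabble
-- ===== SOURCE A (Python) =====
-- def is_scrabble(tiles,word):
--     tl = list(tiles.lower()) #makes the tiles a list)
--     for letter in word.lower(): #for each letter in the word
--         if letter in tl: #if the letter is in the tiles then continue
--             tl.remove(letter) #remove that letter
--         else:
--             return False #if any part does not pass then the word wont be displayed
--     return True #if all parts passed then the word will be displayed
-- ===== SOURCE B (Python) =====
-- def is_scrabble(tiles, word):
--     ts = sorted(tiles.lower())
--     ws = sorted(word.lower())
--     i = 0
--     for ch in ws: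
--         while i < len(ts) and ts[i] != ch:
--             i += 1
--         if i == len(ts):
--             return False
--         i += 1
--     return True
-- ===== Notes on version B (the rewrite author's own statement) =====
-- stated objective: faster
-- what changed: Replaces A's per-letter membership scan with first-occurrence removal from a shrinking tile list by sorting both lowercased strings once and running a single two-pointer merge pass over the sorted sequences.
import Mathlib
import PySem

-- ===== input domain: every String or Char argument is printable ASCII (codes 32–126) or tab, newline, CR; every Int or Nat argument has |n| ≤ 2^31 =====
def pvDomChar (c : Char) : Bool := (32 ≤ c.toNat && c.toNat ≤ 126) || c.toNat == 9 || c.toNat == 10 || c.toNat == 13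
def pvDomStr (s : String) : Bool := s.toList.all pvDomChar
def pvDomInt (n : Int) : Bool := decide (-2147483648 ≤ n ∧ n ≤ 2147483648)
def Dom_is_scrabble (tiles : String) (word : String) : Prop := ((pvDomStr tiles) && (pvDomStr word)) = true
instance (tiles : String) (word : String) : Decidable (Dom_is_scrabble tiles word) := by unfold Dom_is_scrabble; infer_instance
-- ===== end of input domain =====

-- B replaces A's per-letter scan-and-remove over a shrinking tile list by sorting both
-- lowercased strings once and running a single two-pointer merge pass (objective: faster; quadratic scan-and-remove becomes sort + linear merge).

-- ===== PORT A =====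
-- the for-loop over word.lower(): state is the remaining tile list tl
def pvLoopA : List Char → List Char → Bool
  | [], _ => true
  | c :: rest, tl =>
    if c ∈ tl then pvLoopA rest ((PySem.List.remove? tl c).getD tl)  -- tl.remove(letter); guarded, so always `some`
    else false

def is_scrabble (tiles : String) (word : String) : Bool :=
  pvLoopA (PySem.Str.lower word).toList (PySem.Str.lower tiles).toList

-- ===== PORT B =====
-- the two-pointer merge of Source B: skip a tile on mismatch, consume both on match
def pvMerge : List Char → List Char → Bool
  | _, [] => true
  | [], _ :: _ => false
  | t :: ts, c :: ws => if t == c then pvMerge ts ws else pvMerge ts (c :: ws)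

def is_scrabble_alt (tiles : String) (word : String) : Bool :=
  pvMerge (PySem.List.sorted (PySem.Str.lower tiles).toList (fun x => x) false)
          (PySem.List.sorted (PySem.Str.lower word).toList (fun x => x) false)

-- ===== PRECONDITION & SPEC =====
def Spec_is_scrabble (tiles : String) (word : String) (out : Bool) : Prop := out = is_scrabble_alt tiles word
instance (tiles : String) (word : String) (out : Bool) : Decidable (Spec_is_scrabble tiles word out) := by unfold Spec_is_scrabble; infer_instance

-- ===== CLAIM (what is proved, stated in full; the proofs are below) =====
def Claim_equal_is_scrabble : Prop := ∀ (tiles : String) (word : String), Dom_is_scrabble tiles word → Spec_is_scrabble tiles word (is_scrabble tiles word)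

-- ===== LEMMAS AND PROOFS =====

-- A's loop succeeds iff every letter occurs at least as often in the tiles
theorem pvLoopA_iff (w : List Char) : ∀ tl : List Char,
    pvLoopA w tl = true ↔ ∀ c : Char, w.count c ≤ tl.count c := by
  induction w with
  | nil => intro tl; simp [pvLoopA]
  | cons c rest ih =>
    intro tl
    by_cases hc : c ∈ tl
    · rw [pvLoopA, if_pos hc, PySem.List.remove?_eq_some_erase tl c hc, Option.getD_some, ih]
      have h2 : 1 ≤ tl.count c := List.count_pos_iff.mpr hc
      constructor
      · intro h d
        have h1 := h d
        by_cases hd : d = c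
        · subst hd
          rw [List.count_erase_self] at h1
          simp only [List.count_cons_self]
          omega
        · rw [List.count_erase_of_ne hd] at h1
          rw [List.count_cons_of_ne (Ne.symm hd)]
          omega
      · intro h d
        have h1 := h d
        by_cases hd : d = c
        · subst hd
          rw [List.count_cons_self] at h1
          rw [List.count_erase_self]
          omega
        · rw [List.count_cons_of_ne (Ne.symm hd)] at h1
          rw [List.count_erase_of_ne hd]
          omega
    · rw [pvLoopA, if_neg hc]
      have h2 : tl.count c = 0 := List.count_eq_zero.mpr hc
      constructor
      · intro h; exact absurd h (by simp)
      · intro h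
        have h1 := h c
        rw [List.count_cons_self, h2] at h1
        omega

-- the greedy merge decides the subsequence relation (no sortedness needed)
theorem pvMerge_iff (ts : List Char) : ∀ ws : List Char,
    pvMerge ts ws = true ↔ ws.Sublist ts := by
  induction ts with
  | nil =>
    intro ws
    cases ws with
    | nil => simp [pvMerge]
    | cons c ws' => simp [pvMerge]
  | cons t ts' ih =>
    intro ws
    cases ws with
    | nil => simp [pvMerge]
    | cons c ws' =>
      by_cases h : t = c
      · subst h
        rw [pvMerge, if_pos (by simp), ih]
        exact (List.cons_sublist_cons).symm
      · rw [pvMerge, if_neg (by simp [h]), ih]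
        constructor
        · intro hs; exact hs.cons t
        · intro hs
          cases hs with
          | cons _ h' => exact h'
          | cons₂ => exact absurd rfl h

-- on sorted lists, the subsequence relation is the count condition
theorem merge_sorted_iff (xs ys : List Char) :
    pvMerge (PySem.List.sorted xs (fun x => x) false) (PySem.List.sorted ys (fun x => x) false) = true
      ↔ ∀ c : Char, ys.count c ≤ xs.count c := by
  rw [pvMerge_iff]
  have pxs : (PySem.List.sorted xs (fun x => x) false).Perm xs := PySem.List.sorted_perm _ _ _
  have pys : (PySem.List.sorted ys (fun x => x) false).Perm ys := PySem.List.sorted_perm _ _ _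
  constructor
  · intro hs c
    have := List.subperm_ext_iff.mp hs.subperm
    by_cases hm : c ∈ PySem.List.sorted ys (fun x => x) false
    · have h1 := this c hm
      rw [pys.count_eq, pxs.count_eq] at h1
      exact h1
    · have : ys.count c = 0 := by
        rw [← pys.count_eq]
        exact List.count_eq_zero.mpr hm
      omega
  · intro h
    have hsub : List.Subperm (PySem.List.sorted ys (fun x => x) false) (PySem.List.sorted xs (fun x => x) false) := by
      rw [List.subperm_ext_iff]
      intro x hx
      rw [pys.count_eq, pxs.count_eq]
      exact h x
    exact List.sublist_of_subperm_of_sortedLE hsub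
      (List.Pairwise.sortedLE (by simpa using PySem.List.sorted_pairwise ys (fun x => x)))
      (List.Pairwise.sortedLE (by simpa using PySem.List.sorted_pairwise xs (fun x => x)))

-- ===== VERDICT (by name: the statement is the Claim_ definition above) =====
theorem is_scrabble_spec : Claim_equal_is_scrabble := by
  intro tiles word _
  unfold Spec_is_scrabble is_scrabble is_scrabble_alt
  rw [Bool.eq_iff_iff, pvLoopA_iff, merge_sorted_iff]
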